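-- pv_equiv track=rewrite | github.com/DerekPascarella/DreamMovie-UNLOCKED | custom_tools/4 - Fix ECC.py | find_sector_range
-- ===== SOURCE A (Python) =====
-- SECTOR_SIZE = 2336
--
-- def is_mode2_form1(data, offset):
--     """Check whether the sector at offset is Mode 2 Form 1."""
--     if offset + SECTOR_SIZE > len(data):
--         return False
--     # Sub-header: first 4 bytes must match the repeated copy
--     if (data[offset] != data[offset + 4] or
--             data[offset + 1] != data[offset + 5] or
--             data[offset + 2] != data[offset + 6] or
--             data[offset + 3] != data[offset + 7]):
--         return False
--     # Submode: bit 3 set (data), bit 5 clear (Form 1)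
--     return (data[offset + 2] & 0x28) == 0x08
--
-- def find_sector_range(data, alignment):
--     """Find first and last Mode 2 Form 1 sector indices at given alignment."""
--     total = (len(data) - alignment) // SECTOR_SIZE
--     first = None
--     last = None
--     for i in range(total):
--         if is_mode2_form1(data, alignment + i * SECTOR_SIZE):
--             if first is None:
--                 first = i
--             last = i
--     return first, last
-- ===== SOURCE B (Python) =====
-- SECTOR_SIZE = 2336
--
-- def is_mode2_form1(data, offset):
--     """Check whether the sector at offset is Mode 2 Form 1."""
--     if offset + SECTOR_SIZE > len(data):
--         return False
--     if (data[offset] != data[offset + 4] or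
--             data[offset + 1] != data[offset + 5] or
--             data[offset + 2] != data[offset + 6] or
--             data[offset + 3] != data[offset + 7]):
--         return False
--     return (data[offset + 2] & 0x28) == 0x08
--
-- def find_sector_range(data, alignment):
--     """Find first and last Mode 2 Form 1 sector indices at given alignment."""
--     total = (len(data) - alignment) // SECTOR_SIZE
--     first = None
--     for i in range(total):
--         if is_mode2_form1(data, alignment + i * SECTOR_SIZE):
--             first = i
--             break
--     last = None
--     for i in range(total - 1, -1, -1):
--         if is_mode2_form1(data, alignment + i * SECTOR_SIZE):
--             last = i
--             break
--     return first, last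
-- ===== Notes on version B (the rewrite author's own statement) =====
-- stated objective: alternative
-- what changed: Replaces the single accumulating pass that updates first/last on every match with two independent early-terminating directional scans: a forward scan that breaks at the first matching sector and a backward scan that breaks at the last one.
import Mathlib
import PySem

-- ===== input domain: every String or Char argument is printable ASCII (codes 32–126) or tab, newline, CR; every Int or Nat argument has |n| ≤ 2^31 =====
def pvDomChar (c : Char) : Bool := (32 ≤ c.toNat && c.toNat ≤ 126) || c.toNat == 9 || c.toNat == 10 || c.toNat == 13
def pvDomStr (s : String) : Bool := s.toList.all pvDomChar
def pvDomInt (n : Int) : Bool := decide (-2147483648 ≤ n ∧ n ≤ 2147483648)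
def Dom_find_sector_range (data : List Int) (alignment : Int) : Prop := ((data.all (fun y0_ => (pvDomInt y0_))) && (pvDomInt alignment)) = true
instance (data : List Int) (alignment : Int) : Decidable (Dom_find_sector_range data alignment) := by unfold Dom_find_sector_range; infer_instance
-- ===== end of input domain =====

-- B replaces A's single accumulating pass by two early-terminating directional scans (forward for first, backward for last); return values agree on all of Pre_.

-- ===== PORT A =====
def SECTOR_SIZE : Int := 2336

def is_mode2_form1 (data : List Int) (offset : Int) : Bool :=
  if offset + SECTOR_SIZE > (data.length : Int) then false
  else if PySem.List.pyGetD data offset 0 != PySem.List.pyGetD data (offset+4) 0 ||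
          PySem.List.pyGetD data (offset+1) 0 != PySem.List.pyGetD data (offset+5) 0 ||
          PySem.List.pyGetD data (offset+2) 0 != PySem.List.pyGetD data (offset+6) 0 ||
          PySem.List.pyGetD data (offset+3) 0 != PySem.List.pyGetD data (offset+7) 0 then false
  else PySem.Int.band (PySem.List.pyGetD data (offset+2) 0) 0x28 == 0x08

def find_sector_range (data : List Int) (alignment : Int) : Option Int × Option Int :=
  let total := PySem.Int.floordiv ((data.length : Int) - alignment) SECTOR_SIZE
  (PySem.List.pyRange 0 total 1).foldl
    (fun st i =>
      if is_mode2_form1 data (alignment + i * SECTOR_SIZE) then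
        ((match st.1 with | none => some i | some f => some f), some i)
      else st)
    (none, none)

-- ===== PORT B =====
-- Source B's early-breaking 'for … break' loop: first index in the given order whose sector matches
def scanFirst (data : List Int) (alignment : Int) : List Int → Option Int
  | [] => none
  | i :: rest =>
    if is_mode2_form1 data (alignment + i * SECTOR_SIZE) then some i
    else scanFirst data alignment rest

def find_sector_range_alt (data : List Int) (alignment : Int) : Option Int × Option Int :=
  let total := PySem.Int.floordiv ((data.length : Int) - alignment) SECTOR_SIZE
  (scanFirst data alignment (PySem.List.pyRange 0 total 1),
   scanFirst data alignment (PySem.List.pyRange (total - 1) (-1) (-1)))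

-- ===== PRECONDITION & SPEC =====
-- Pre_ excludes exactly the inputs on which Python A raises IndexError (a negative offset
-- alignment < -len(data) reached while a full sector still fits); Python B raises there too.
def Pre_find_sector_range (data : List Int) (alignment : Int) : Prop :=
  ¬ (alignment + (data.length : Int) < 0 ∧ alignment + 2336 ≤ (data.length : Int))
instance (data : List Int) (alignment : Int) : Decidable (Pre_find_sector_range data alignment) := by unfold Pre_find_sector_range; infer_instance

def pvWitness_find_sector_range : List Int × Int := ([8, 0, 8, 0], 0)

def Spec_find_sector_range (data : List Int) (alignment : Int) (out : Option Int × Option Int) : Prop := out = find_sector_range_alt data alignment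
instance (data : List Int) (alignment : Int) (out : Option Int × Option Int) : Decidable (Spec_find_sector_range data alignment out) := by unfold Spec_find_sector_range; infer_instance

-- ===== CLAIM (what is proved, stated in full; the proofs are below) =====
def Claim_equal_find_sector_range : Prop := ∀ (data : List Int) (alignment : Int), Dom_find_sector_range data alignment → Pre_find_sector_range data alignment → Spec_find_sector_range data alignment (find_sector_range data alignment)

-- ===== LEMMAS AND PROOFS =====

lemma scanFirst_append (data : List Int) (alignment : Int) (xs ys : List Int) :
    scanFirst data alignment (xs ++ ys) =
      match scanFirst data alignment xs with
      | some j => some j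
      | none => scanFirst data alignment ys := by
  induction xs with
  | nil => simp [scanFirst]
  | cons i rest ih =>
    by_cases h : is_mode2_form1 data (alignment + i * SECTOR_SIZE) <;>
      simp [scanFirst, h, ih]

lemma foldl_eq_scans (data : List Int) (alignment : Int) :
    ∀ (L : List Int) (a b : Option Int),
      L.foldl
        (fun st i =>
          if is_mode2_form1 data (alignment + i * SECTOR_SIZE) then
            ((match st.1 with | none => some i | some f => some f), some i)
          else st) (a, b)
      = ((match a with | none => scanFirst data alignment L | some f => some f),
         (match scanFirst data alignment L.reverse with | some j => some j | none => b)) := by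
  intro L
  induction L with
  | nil =>
    intro a b
    cases a <;> simp [scanFirst]
  | cons i rest ih =>
    intro a b
    by_cases h : is_mode2_form1 data (alignment + i * SECTOR_SIZE)
    · simp only [List.foldl_cons, h, if_pos, List.reverse_cons, scanFirst,
        scanFirst_append, ih]
      cases a <;> cases hr : scanFirst data alignment rest.reverse <;> simp
    · simp only [List.foldl_cons, h, List.reverse_cons, scanFirst,
        scanFirst_append, ih]
      cases a <;> cases hr : scanFirst data alignment rest.reverse <;> simp

-- ===== VERDICT (by name: the statement is the Claim_ definition above) =====
theorem find_sector_range_spec : Claim_equal_find_sector_range := by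
  intro data alignment _ _
  unfold Spec_find_sector_range find_sector_range find_sector_range_alt
  show _ = (scanFirst data alignment (PySem.List.pyRange 0
      (PySem.Int.floordiv ((data.length : Int) - alignment) SECTOR_SIZE) 1),
    scanFirst data alignment (PySem.List.pyRange
      (PySem.Int.floordiv ((data.length : Int) - alignment) SECTOR_SIZE - 1) (-1) (-1)))
  rw [foldl_eq_scans]
  have hrev : PySem.List.pyRange
      (PySem.Int.floordiv ((data.length : Int) - alignment) SECTOR_SIZE - 1) (-1) (-1)
      = (PySem.List.pyRange 0
          (PySem.Int.floordiv ((data.length : Int) - alignment) SECTOR_SIZE) 1).reverse := by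
    rw [PySem.List.pyRange_neg_one_eq_reverse]
    norm_num
  rw [hrev]
  cases scanFirst data alignment
      ((PySem.List.pyRange 0
        (PySem.Int.floordiv ((data.length : Int) - alignment) SECTOR_SIZE) 1).reverse) <;>
    simp
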